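-- pv_equiv track=rewrite | github.com/HavilMal/JS-L | L2/Utils/read.py | read_sentence
-- ===== SOURCE A (Python) =====
-- from typing import Generator, Any
--
-- def read_sentence(generator) -> Generator[str, Any, None]:
--     sentence = ""
--     for line in generator:
--         for char in line:
--             if not (sentence == "" and char == " "):
--                 if not (char.isspace() and char != " "):
--                     sentence += char
--
--             if char == "." or char == "!" or char == "?":
--                 yield sentence
--                 sentence = ""
-- ===== SOURCE B (Python) =====
-- def read_sentence(generator):
--     text = "".join(generator)
--     rest = "".join(c for c in text if c == " " or not c.isspace())
--     while True:
--         i = next((k for k, c in enumerate(rest) if c in ".!?"), None)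
--         if i is None:
--             return
--         yield rest[: i + 1].lstrip(" ")
--         rest = rest[i + 1:]
-- ===== Notes on version B (the rewrite author's own statement) =====
-- stated objective: idiomatic
-- what changed: A's per-character state machine (conditional append + yield-on-terminator) is replaced by materializing the stream with join, one whitespace-filter pass, and a loop that repeatedly finds the next terminator and yields the lstripped slice through it.
import Mathlib
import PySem

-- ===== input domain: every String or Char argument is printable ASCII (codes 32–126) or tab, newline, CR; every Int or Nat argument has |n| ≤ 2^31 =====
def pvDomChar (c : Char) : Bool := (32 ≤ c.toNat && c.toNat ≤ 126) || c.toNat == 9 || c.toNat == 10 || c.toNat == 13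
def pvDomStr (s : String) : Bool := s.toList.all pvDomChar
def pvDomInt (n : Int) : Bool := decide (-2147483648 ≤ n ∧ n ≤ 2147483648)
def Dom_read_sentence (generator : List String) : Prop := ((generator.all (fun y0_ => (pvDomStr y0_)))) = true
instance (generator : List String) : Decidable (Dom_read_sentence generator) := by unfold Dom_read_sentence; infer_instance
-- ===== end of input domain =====

-- B replaces A's per-character state machine by join + one whitespace-filter pass + span-splitting
-- at terminators with a per-sentence lstrip (objective: simpler/idiomatic; return-value equivalence;
-- A is a generator, B is eager — equal as lists of yielded values).

-- ===== PORT A =====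
-- A: char-by-char state machine over the streamed lines.
def read_sentence_stepA (st : List Char × List String) (char : Char) : List Char × List String :=
  let sentence :=
    if ¬(st.1 = [] ∧ char = ' ') then
      if ¬(PySem.Chars.isspace char = true ∧ char ≠ ' ') then st.1 ++ [char] else st.1
    else st.1
  if char = '.' ∨ char = '!' ∨ char = '?' then ([], st.2 ++ [String.ofList sentence])
  else (sentence, st.2)

def read_sentence (generator : List String) : List String :=
  (generator.foldl (fun st line => line.toList.foldl read_sentence_stepA st)
    (([] : List Char), ([] : List String))).2

-- ===== PORT B =====
-- Source B's while loop: find the first terminator, yield the lstripped prefix through it, continue on the rest.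
def read_sentence_isTerm (c : Char) : Bool := c == '.' || c == '!' || c == '?'

def read_sentence_altAux (rest : List Char) : List String :=
  match h : rest.dropWhile (fun c => !read_sentence_isTerm c) with
  | [] => []
  | t :: rs =>
      String.ofList (((rest.takeWhile (fun c => !read_sentence_isTerm c)) ++ [t]).dropWhile (fun c => c == ' '))
        :: read_sentence_altAux rs
termination_by rest.length
decreasing_by
  have := List.length_dropWhile_le (fun c => !read_sentence_isTerm c) rest
  rw [h] at this; simpa using Nat.lt_of_succ_le (by simpa using this)

def read_sentence_alt (generator : List String) : List String :=
  let text := (generator.map String.toList).flatten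
  let rest := text.filter (fun c => c == ' ' || !PySem.Chars.isspace c)
  read_sentence_altAux rest

-- ===== PRECONDITION & SPEC =====
def Spec_read_sentence (generator : List String) (out : List String) : Prop := out = read_sentence_alt generator
instance (generator : List String) (out : List String) : Decidable (Spec_read_sentence generator out) := by unfold Spec_read_sentence; infer_instance

-- ===== CLAIM (what is proved, stated in full; the proofs are below) =====
def Claim_equal_read_sentence : Prop := ∀ (generator : List String), Dom_read_sentence generator → Spec_read_sentence generator (read_sentence generator)

-- ===== LEMMAS AND PROOFS =====

-- the no-whitespace-check machine over the filtered characters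
def read_sentence_stepN (st : List Char × List String) (c : Char) : List Char × List String :=
  let acc := if ¬(st.1 = [] ∧ c = ' ') then st.1 ++ [c] else st.1
  if read_sentence_isTerm c then ([], st.2 ++ [String.ofList acc]) else (acc, st.2)

lemma rs_term_iff (c : Char) :
    (c = '.' ∨ c = '!' ∨ c = '?') ↔ read_sentence_isTerm c = true := by
  simp [read_sentence_isTerm, or_assoc]

lemma rs_isTerm_not_space {c : Char} (h : read_sentence_isTerm c = true) : c ≠ ' ' := by
  intro hc; subst hc; exact absurd h (by decide)

lemma rs_isspace_not_term {c : Char} (h : PySem.Chars.isspace c = true) :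
    read_sentence_isTerm c = false := by
  by_contra hne
  have ht : read_sentence_isTerm c = true := by simpa using hne
  have : c = '.' ∨ c = '!' ∨ c = '?' := (rs_term_iff c).2 ht
  rcases this with rfl | rfl | rfl <;> exact absurd h (by decide)

-- A's machine over cs = N-machine over the whitespace-filtered cs
lemma rs_filter (cs : List Char) (acc : List Char) (out : List String) :
    cs.foldl read_sentence_stepA (acc, out)
      = (cs.filter (fun c => c == ' ' || !PySem.Chars.isspace c)).foldl read_sentence_stepN (acc, out) := by
  induction cs generalizing acc out with
  | nil => rfl
  | cons c cs ih =>
    by_cases hk : (c == ' ' || !PySem.Chars.isspace c) = true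
    · have hws : ¬(PySem.Chars.isspace c = true ∧ c ≠ ' ') := by
        simp only [Bool.or_eq_true, beq_iff_eq, Bool.not_eq_true'] at hk
        rcases hk with h | h <;> simp [h]
      have hstep : read_sentence_stepA (acc, out) c = read_sentence_stepN (acc, out) c := by
        simp only [read_sentence_stepA, read_sentence_stepN, if_pos hws, rs_term_iff]
      simp only [List.foldl_cons, List.filter_cons, if_pos hk, hstep]
      exact ih _ _
    · have hws : PySem.Chars.isspace c = true ∧ c ≠ ' ' := by
        simp only [Bool.or_eq_true, beq_iff_eq, Bool.not_eq_true'] at hk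
        push_neg at hk; exact ⟨by simpa using hk.2, hk.1⟩
      have hnt : read_sentence_isTerm c = false := rs_isspace_not_term hws.1
      have hstep : read_sentence_stepA (acc, out) c = (acc, out) := by
        have h1 : ¬((acc, out).1 = [] ∧ c = ' ') := fun h => hws.2 h.2
        simp only [read_sentence_stepA, if_pos h1, if_neg (not_not_intro hws)]
        rw [if_neg (by rw [rs_term_iff, hnt]; simp)]
      simp only [List.foldl_cons, List.filter_cons, hk, Bool.false_eq_true, if_false, hstep]
      exact ih _ _

-- the chunk the altAux recursion produces from a carried accumulator
def read_sentence_gL (acc x : List Char) : List Char :=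
  if acc = [] then x.dropWhile (fun c => c == ' ') else acc ++ x

def read_sentence_sents (acc : List Char) (cs : List Char) : List String :=
  match h : cs.dropWhile (fun c => !read_sentence_isTerm c) with
  | [] => []
  | t :: rs =>
      String.ofList (read_sentence_gL acc ((cs.takeWhile (fun c => !read_sentence_isTerm c)) ++ [t]))
        :: read_sentence_sents [] rs
termination_by cs.length
decreasing_by
  have := List.length_dropWhile_le (fun c => !read_sentence_isTerm c) cs
  rw [h] at this; simpa using Nat.lt_of_succ_le (by simpa using this)

-- unfolding equations for the two chunk recursions
lemma rs_altAux_nil {cs : List Char}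
    (h : cs.dropWhile (fun c => !read_sentence_isTerm c) = []) :
    read_sentence_altAux cs = [] := by
  rw [read_sentence_altAux]; split <;> simp_all

lemma rs_altAux_cons {cs t rs}
    (h : cs.dropWhile (fun c => !read_sentence_isTerm c) = t :: rs) :
    read_sentence_altAux cs
      = String.ofList (((cs.takeWhile (fun c => !read_sentence_isTerm c)) ++ [t]).dropWhile (fun c => c == ' '))
        :: read_sentence_altAux rs := by
  rw [read_sentence_altAux]; split <;> simp_all

lemma rs_sents_nil {acc : List Char} {cs : List Char}
    (h : cs.dropWhile (fun c => !read_sentence_isTerm c) = []) :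
    read_sentence_sents acc cs = [] := by
  rw [read_sentence_sents]; split <;> simp_all

lemma rs_sents_cons {acc : List Char} {cs t rs}
    (h : cs.dropWhile (fun c => !read_sentence_isTerm c) = t :: rs) :
    read_sentence_sents acc cs
      = String.ofList (read_sentence_gL acc ((cs.takeWhile (fun c => !read_sentence_isTerm c)) ++ [t]))
        :: read_sentence_sents [] rs := by
  rw [read_sentence_sents]; split <;> simp_all

lemma rs_sents_empty_acc (cs : List Char) :
    read_sentence_sents [] cs = read_sentence_altAux cs := by
  induction hn : cs.length using Nat.strong_induction_on generalizing cs with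
  | _ n ih =>
  cases h : cs.dropWhile (fun c => !read_sentence_isTerm c) with
  | nil => rw [rs_sents_nil h, rs_altAux_nil h]
  | cons t rs =>
    have hlt : rs.length < cs.length := by
      have := List.length_dropWhile_le (fun c => !read_sentence_isTerm c) cs
      rw [h] at this; simpa using Nat.lt_of_succ_le (by simpa using this)
    rw [rs_sents_cons h, rs_altAux_cons h, read_sentence_gL, if_pos rfl,
      ih rs.length (hn ▸ hlt) rs rfl]

-- main invariant: running the N machine from (acc, out) appends exactly the sentences of sents acc
lemma rs_main (cs : List Char) (acc : List Char) (out : List String) :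
    (cs.foldl read_sentence_stepN (acc, out)).2 = out ++ read_sentence_sents acc cs := by
  induction cs generalizing acc out with
  | nil =>
    rw [rs_sents_nil (by simp)]; simp
  | cons c cs ih =>
    by_cases ht : read_sentence_isTerm c = true
    · have hcs : c ≠ ' ' := rs_isTerm_not_space ht
      have hstep : read_sentence_stepN (acc, out) c = ([], out ++ [String.ofList (acc ++ [c])]) := by
        simp [read_sentence_stepN, ht, hcs]
      have hdrop : (c :: cs).dropWhile (fun c => !read_sentence_isTerm c) = c :: cs :=
        List.dropWhile_cons_of_neg (by simpa using ht)
      have hg : read_sentence_gL acc ((c :: cs).takeWhile (fun c => !read_sentence_isTerm c) ++ [c])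
          = acc ++ [c] := by
        rw [List.takeWhile_cons_of_neg (by simpa using ht)]
        rcases acc with _ | ⟨a, as⟩ <;> simp [read_sentence_gL, hcs]
      rw [List.foldl_cons, hstep, ih, rs_sents_cons hdrop, hg, rs_sents_empty_acc]
      simp
    · have ht' : read_sentence_isTerm c = false := by simpa using ht
      have hdrop : (c :: cs).dropWhile (fun c => !read_sentence_isTerm c)
          = cs.dropWhile (fun c => !read_sentence_isTerm c) :=
        List.dropWhile_cons_of_pos (by simpa using ht')
      have htake : (c :: cs).takeWhile (fun c => !read_sentence_isTerm c)
          = c :: cs.takeWhile (fun c => !read_sentence_isTerm c) :=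
        List.takeWhile_cons_of_pos (by simpa using ht')
      by_cases hsp : acc = [] ∧ c = ' '
      · obtain ⟨rfl, rfl⟩ := hsp
        have hstep : read_sentence_stepN (([] : List Char), out) ' ' = ([], out) := by
          simp [read_sentence_stepN, read_sentence_isTerm]
        rw [List.foldl_cons, hstep, ih]
        congr 1
        cases h : cs.dropWhile (fun c => !read_sentence_isTerm c) with
        | nil => rw [rs_sents_nil (hdrop.trans h), rs_sents_nil h]
        | cons t rs =>
          rw [rs_sents_cons (hdrop.trans h), rs_sents_cons h, htake]
          simp [read_sentence_gL]
      · have hstep : read_sentence_stepN (acc, out) c = (acc ++ [c], out) := by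
          simp only [read_sentence_stepN, if_pos hsp, ht']
          simp [hsp]
        rw [List.foldl_cons, hstep, ih]
        congr 1
        cases h : cs.dropWhile (fun c => !read_sentence_isTerm c) with
        | nil => rw [rs_sents_nil (hdrop.trans h), rs_sents_nil h]
        | cons t rs =>
          rw [rs_sents_cons (hdrop.trans h), rs_sents_cons h, htake]
          congr 2
          rcases hacc : acc with _ | ⟨a, as⟩
          · have hc : c ≠ ' ' := by rintro rfl; exact hsp ⟨hacc, rfl⟩
            simp [read_sentence_gL, hc]
          · simp [read_sentence_gL]

lemma rs_flatten (generator : List String) (st : List Char × List String) :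
    generator.foldl (fun st line => line.toList.foldl read_sentence_stepA st) st
      = ((generator.map String.toList).flatten).foldl read_sentence_stepA st := by
  induction generator generalizing st with
  | nil => rfl
  | cons l ls ih => simp [List.foldl_append, ih]

-- ===== VERDICT (by name: the statement is the Claim_ definition above) =====
theorem read_sentence_spec : Claim_equal_read_sentence := by
  intro generator _
  unfold Spec_read_sentence read_sentence read_sentence_alt
  rw [rs_flatten, rs_filter, rs_main, rs_sents_empty_acc]
  simp
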